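-- pv_equiv track=rewrite | github.com/trzmielewskiR/schedulingAlgorithms | 6/second.py | timeSumForOneMachine
-- ===== SOURCE A (Python) =====
-- def timeSumForOneMachine(listOfOrders):
--     result = 0
--     lastArgumentTime = 0
--     for order in listOfOrders:
--         lastArgumentSum = (order[1] + lastArgumentTime)
--         result = result + lastArgumentSum
--         lastArgumentTime = lastArgumentSum
--     return result
-- ===== SOURCE B (Python) =====
-- def timeSumForOneMachine(listOfOrders):
--     # Recompute each order's completion time from scratch with an inner
--     # index loop (no running accumulator carried between iterations).
--     result = 0
--     for i in range(len(listOfOrders)):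
--         completion = 0
--         for j in range(i + 1):
--             completion = completion + listOfOrders[j][1]
--         result = result + completion
--     return result
-- ===== Notes on version B (the rewrite author's own statement) =====
-- stated objective: alternative
-- what changed: B drops A's running completion-time accumulator and instead recomputes each order's completion time from scratch with a nested index loop over the prefix, summing those independent prefix sums.
import Mathlib
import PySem

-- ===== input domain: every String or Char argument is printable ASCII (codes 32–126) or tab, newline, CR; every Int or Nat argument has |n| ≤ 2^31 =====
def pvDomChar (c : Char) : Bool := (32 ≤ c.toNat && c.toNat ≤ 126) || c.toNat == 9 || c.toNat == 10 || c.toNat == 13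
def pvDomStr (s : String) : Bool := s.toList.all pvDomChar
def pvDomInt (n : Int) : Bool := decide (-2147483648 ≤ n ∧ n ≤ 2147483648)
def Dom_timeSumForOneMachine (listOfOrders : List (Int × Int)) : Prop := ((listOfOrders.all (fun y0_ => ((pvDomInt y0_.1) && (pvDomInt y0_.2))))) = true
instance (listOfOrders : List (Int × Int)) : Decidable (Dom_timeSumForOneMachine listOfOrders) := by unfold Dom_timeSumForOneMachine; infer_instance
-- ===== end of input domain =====

-- B drops A's running accumulator and recomputes each completion time from
-- scratch with a nested index loop; alternative decomposition (O(n^2) vs O(n)).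


-- ===== PORT A =====
def timeSumForOneMachine (listOfOrders : List (Int × Int)) : Int :=
  (listOfOrders.foldl
    (fun (s : Int × Int) order =>
      let lastArgumentSum := order.2 + s.2
      (s.1 + lastArgumentSum, lastArgumentSum))
    (0, 0)).1

-- ===== PORT B =====
-- indices i, j are always in range, so pyGetD is exact here
def timeSumForOneMachine_alt (listOfOrders : List (Int × Int)) : Int :=
  (PySem.List.pyRange 0 (listOfOrders.length : Int) 1).foldl
    (fun (result : Int) i =>
      result +
        (PySem.List.pyRange 0 (i + 1) 1).foldl
          (fun (completion : Int) j =>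
            completion + (PySem.List.pyGetD listOfOrders j (0, 0)).2)
          0)
    0

-- ===== PRECONDITION & SPEC =====
def Spec_timeSumForOneMachine (listOfOrders : List (Int × Int)) (out : Int) : Prop := out = timeSumForOneMachine_alt listOfOrders
instance (listOfOrders : List (Int × Int)) (out : Int) : Decidable (Spec_timeSumForOneMachine listOfOrders out) := by unfold Spec_timeSumForOneMachine; infer_instance

-- ===== CLAIM (what is proved, stated in full; the proofs are below) =====
def Claim_equal_timeSumForOneMachine : Prop := ∀ (listOfOrders : List (Int × Int)), Dom_timeSumForOneMachine listOfOrders → Spec_timeSumForOneMachine listOfOrders (timeSumForOneMachine listOfOrders)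

-- ===== LEMMAS AND PROOFS =====

-- prefix sum of the durations (getD form, matching pyGetD_natCast)
def pvPre (xs : List (Int × Int)) (m : Nat) : Int :=
  ∑ j ∈ Finset.range m, (xs.getD j (0, 0)).2

-- a foldl of shape 'res + f i' over range(0, m) is a Finset sum
theorem pv_fold_range (m : Nat) (f : Int → Int) (r : Int) :
    (PySem.List.pyRange 0 (m : Int) 1).foldl (fun res i => res + f i) r
      = r + ∑ k ∈ Finset.range m, f (k : Int) := by
  induction m generalizing r with
  | zero => simp [PySem.List.pyRange_one_eq_nil]
  | succ m ih =>
    have h : ((m : Int) + 1) = ((m + 1 : Nat) : Int) := by push_cast; ring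
    rw [← h, PySem.List.pyRange_one_succ_right (by positivity),
        List.foldl_append, ih, Finset.sum_range_succ]
    simp [add_assoc]

theorem pv_pre_cons (x : Int × Int) (xs : List (Int × Int)) (k : Nat) :
    pvPre (x :: xs) (k + 1) = x.2 + pvPre xs k := by
  unfold pvPre
  rw [Finset.sum_range_succ']
  simp [List.getD, add_comm]

-- A's fold computes the sum of shifted prefix sums
theorem pvA_fold (xs : List (Int × Int)) (r l : Int) :
    (xs.foldl
      (fun (s : Int × Int) order =>
        let lastArgumentSum := order.2 + s.2
        (s.1 + lastArgumentSum, lastArgumentSum)) (r, l)).1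
      = r + ∑ k ∈ Finset.range xs.length, (l + pvPre xs (k + 1)) := by
  induction xs generalizing r l with
  | nil => simp
  | cons x xs ih =>
    simp only [List.foldl_cons, List.length_cons, ih]
    rw [Finset.sum_range_succ']
    have : ∀ k, l + pvPre (x :: xs) (k + 1 + 1) = (x.2 + l) + pvPre xs (k + 1) := by
      intro k; rw [pv_pre_cons]; ring
    simp only [this]
    have h0 : l + pvPre (x :: xs) (0 + 1) = l + x.2 := by
      simp [pvPre]
    rw [h0]; ring

-- B's inner loop over range(0, k+1) is the (k+1)-prefix sum
theorem pvB_inner (xs : List (Int × Int)) (k : Nat) :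
    (PySem.List.pyRange 0 ((k : Int) + 1) 1).foldl
        (fun (completion : Int) j => completion + (PySem.List.pyGetD xs j (0, 0)).2) 0
      = pvPre xs (k + 1) := by
  have h : ((k : Int) + 1) = ((k + 1 : Nat) : Int) := by push_cast; ring
  rw [h, pv_fold_range]
  unfold pvPre
  simp

-- ===== VERDICT (by name: the statement is the Claim_ definition above) =====
theorem timeSumForOneMachine_spec : Claim_equal_timeSumForOneMachine := by
  intro xs _
  unfold Spec_timeSumForOneMachine timeSumForOneMachine timeSumForOneMachine_alt
  rw [pvA_fold, pv_fold_range]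
  simp only [pvB_inner, zero_add]
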